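-- pv_equiv track=rewrite | github.com/Theodule007/cdmaSimulation | projet_telephonie.py | equ_message
-- ===== SOURCE A (Python) =====
-- def equ_message(message1, message2):
--     mes1 = []
--     mes1.extend(message1)
--     mes2 = []
--     mes2.extend(message2)
--     if (len(message1)>len(message2)):
--         nbr = len(message1)-len(message2)
--         for i in range(nbr):
--             mes2.append(0)
--     elif(len(message2)>len(message1)):
--         nbr = len(message2)-len(message1)
--         for i in range(nbr):
--             mes1.append(0)
--     return mes1, mes2
-- ===== SOURCE B (Python) =====
-- def equ_message(message1, message2):
--     # Lockstep merge: one cursor walks both lists in parallel, emitting the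
--     # element or 0 once a list is exhausted; no branch on which list is longer.
--     mes1, mes2 = [], []
--     i = 0
--     while i < len(message1) or i < len(message2):
--         mes1.append(message1[i] if i < len(message1) else 0)
--         mes2.append(message2[i] if i < len(message2) else 0)
--         i += 1
--     return mes1, mes2
-- ===== Notes on version B (the rewrite author's own statement) =====
-- stated objective: alternative
-- what changed: Replaces copy-then-pad (compare lengths, append zeros to the shorter copy) with a lockstep merge that consumes both lists in parallel, emitting each element or 0 once one list is exhausted, with no length computation or branch on which list is longer.
import Mathlib
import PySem

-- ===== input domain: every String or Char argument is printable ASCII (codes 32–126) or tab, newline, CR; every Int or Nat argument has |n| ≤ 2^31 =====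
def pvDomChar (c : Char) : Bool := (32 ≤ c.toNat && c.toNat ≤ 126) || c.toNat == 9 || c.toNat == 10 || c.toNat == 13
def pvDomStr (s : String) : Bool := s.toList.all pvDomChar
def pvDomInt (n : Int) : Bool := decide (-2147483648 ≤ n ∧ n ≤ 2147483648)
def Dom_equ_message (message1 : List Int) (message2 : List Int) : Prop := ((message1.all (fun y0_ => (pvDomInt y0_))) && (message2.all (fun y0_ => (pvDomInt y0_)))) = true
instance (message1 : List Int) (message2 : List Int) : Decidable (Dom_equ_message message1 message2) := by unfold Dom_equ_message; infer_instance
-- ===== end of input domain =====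

-- B replaces copy-then-pad with a lockstep merge consuming both lists in parallel (objective: alternative).

-- ===== PORT A =====
def equ_message (message1 : List Int) (message2 : List Int) : List Int × List Int :=
  let mes1 := ([] : List Int) ++ message1
  let mes2 := ([] : List Int) ++ message2
  if message1.length > message2.length then
    let nbr : Int := (message1.length : Int) - (message2.length : Int)
    let mes2 := (PySem.List.pyRange 0 nbr 1).foldl (fun acc _ => acc ++ [(0 : Int)]) mes2
    (mes1, mes2)
  else if message2.length > message1.length then
    let nbr : Int := (message2.length : Int) - (message1.length : Int)
    let mes1 := (PySem.List.pyRange 0 nbr 1).foldl (fun acc _ => acc ++ [(0 : Int)]) mes1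
    (mes1, mes2)
  else (mes1, mes2)

-- ===== PORT B =====
-- lockstep loop: one cursor i walks both lists; element or 0 once a list is exhausted
def equ_message_altGo (m1 m2 mes1 mes2 : List Int) (i : Nat) : List Int × List Int :=
  if i < m1.length ∨ i < m2.length then
    equ_message_altGo m1 m2
      (mes1 ++ [if h : i < m1.length then m1[i] else 0])
      (mes2 ++ [if h : i < m2.length then m2[i] else 0])
      (i + 1)
  else (mes1, mes2)
termination_by (m1.length - i) + (m2.length - i)

def equ_message_alt (message1 : List Int) (message2 : List Int) : List Int × List Int :=
  equ_message_altGo message1 message2 [] [] 0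

-- ===== PRECONDITION & SPEC =====
def Spec_equ_message (message1 : List Int) (message2 : List Int) (out : List Int × List Int) : Prop := out = equ_message_alt message1 message2
instance (message1 : List Int) (message2 : List Int) (out : List Int × List Int) : Decidable (Spec_equ_message message1 message2 out) := by unfold Spec_equ_message; infer_instance

-- ===== CLAIM (what is proved, stated in full; the proofs are below) =====
def Claim_equal_equ_message : Prop := ∀ (message1 : List Int) (message2 : List Int), Dom_equ_message message1 message2 → Spec_equ_message message1 message2 (equ_message message1 message2)

-- ===== LEMMAS AND PROOFS =====
lemma foldl_append_zero (l : List Int) (m : List Int) :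
    l.foldl (fun acc _ => acc ++ [(0 : Int)]) m = m ++ List.replicate l.length 0 := by
  induction l generalizing m with
  | nil => simp
  | cons x xs ih => rw [List.foldl_cons, ih]; simp [List.replicate_succ]

lemma foldl_range_append (m : List Int) (k : Nat) :
    (PySem.List.pyRange 0 (k : Int) 1).foldl (fun acc _ => acc ++ [(0 : Int)]) m
      = m ++ List.replicate k 0 := by
  rw [foldl_append_zero, PySem.List.length_pyRange_one]
  simp

lemma altGo_eq (m1 m2 : List Int) (mes1 mes2 : List Int) (i : Nat) :
    equ_message_altGo m1 m2 mes1 mes2 i =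
      (mes1 ++ m1.drop i ++ List.replicate (m2.length - max i m1.length) 0,
       mes2 ++ m2.drop i ++ List.replicate (m1.length - max i m2.length) 0) := by
  fun_induction equ_message_altGo m1 m2 mes1 mes2 i with
  | case1 mes1 mes2 i hg ih =>
    rw [ih, Prod.mk.injEq]
    constructor
    · by_cases h1 : i < m1.length
      · have hd : m1.drop i = m1[i] :: m1.drop (i + 1) := List.drop_eq_getElem_cons h1
        have hm : max (i + 1) m1.length = max i m1.length := by omega
        rw [dif_pos h1, hm, hd]; simp
      · have h2 : i < m2.length := by tauto
        have hd : m1.drop i = [] := List.drop_eq_nil_of_le (by omega)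
        have hd' : m1.drop (i + 1) = [] := List.drop_eq_nil_of_le (by omega)
        have e : m2.length - max i m1.length = (m2.length - max (i + 1) m1.length) + 1 := by omega
        simp [h1, hd, hd', e, List.replicate_succ]
    · by_cases h2 : i < m2.length
      · have hd : m2.drop i = m2[i] :: m2.drop (i + 1) := List.drop_eq_getElem_cons h2
        have hm : max (i + 1) m2.length = max i m2.length := by omega
        rw [dif_pos h2, hm, hd]; simp
      · have h1 : i < m1.length := by tauto
        have hd : m2.drop i = [] := List.drop_eq_nil_of_le (by omega)
        have hd' : m2.drop (i + 1) = [] := List.drop_eq_nil_of_le (by omega)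
        have e : m1.length - max i m2.length = (m1.length - max (i + 1) m2.length) + 1 := by omega
        simp [h2, hd, hd', e, List.replicate_succ]
  | case2 mes1 mes2 i hg =>
    have h1 : m1.length ≤ i := by omega
    have h2 : m2.length ≤ i := by omega
    have e1 : m2.length - max i m1.length = 0 := by omega
    have e2 : m1.length - max i m2.length = 0 := by omega
    simp [List.drop_eq_nil_of_le h1, List.drop_eq_nil_of_le h2, e1, e2]

-- ===== VERDICT (by name: the statement is the Claim_ definition above) =====
theorem equ_message_spec : Claim_equal_equ_message := by
  intro m1 m2 _
  unfold Spec_equ_message equ_message equ_message_alt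
  rw [altGo_eq]
  simp only [List.nil_append, List.drop_zero, Nat.zero_max]
  split_ifs with h1 h2
  · rw [show ((m1.length : Int) - (m2.length : Int)) = ((m1.length - m2.length : Nat) : Int) by omega,
        foldl_range_append]
    have e1 : m2.length - m1.length = 0 := by omega
    simp [e1]
  · rw [show ((m2.length : Int) - (m1.length : Int)) = ((m2.length - m1.length : Nat) : Int) by omega,
        foldl_range_append]
    have e1 : m1.length - m2.length = 0 := by omega
    simp [e1]
  · have e : m1.length = m2.length := by omega
    simp [e]
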